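-- pv_equiv track=rewrite | github.com/shoya-koyama/cram_report | temp/similar.py | is_similar_string
-- ===== SOURCE A (Python) =====
-- def is_similar_string(n,s,t):
--     if len(s) != len(t):
--         return False
--
--     for i in range(len(s)):
--         a = s[i]
--         b = t[i]
--
--         if a == b:
--             continue
--
--         if (a == '1' and b == 'l') or (a == 'l' and b == '1'):
--             continue
--
--         if (a == '0' and b == 'o') or (a == 'o' and b == '0'):
--             continue
--
--         return False
--
--     return True
-- ===== SOURCE B (Python) =====
-- _CANON = str.maketrans({'l': '1', 'o': '0'})
--
-- def is_similar_string(n, s, t):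
--     return s.translate(_CANON) == t.translate(_CANON)
-- ===== Notes on version B (the rewrite author's own statement) =====
-- stated objective: idiomatic
-- what changed: Replaced the index loop with its per-position branch ladder by a canonicalize-then-compare: each string is mapped through the equivalence table {'l':'1','o':'0'} via str.translate and the results are compared for equality (length inequality falls out automatically).
import Mathlib
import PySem

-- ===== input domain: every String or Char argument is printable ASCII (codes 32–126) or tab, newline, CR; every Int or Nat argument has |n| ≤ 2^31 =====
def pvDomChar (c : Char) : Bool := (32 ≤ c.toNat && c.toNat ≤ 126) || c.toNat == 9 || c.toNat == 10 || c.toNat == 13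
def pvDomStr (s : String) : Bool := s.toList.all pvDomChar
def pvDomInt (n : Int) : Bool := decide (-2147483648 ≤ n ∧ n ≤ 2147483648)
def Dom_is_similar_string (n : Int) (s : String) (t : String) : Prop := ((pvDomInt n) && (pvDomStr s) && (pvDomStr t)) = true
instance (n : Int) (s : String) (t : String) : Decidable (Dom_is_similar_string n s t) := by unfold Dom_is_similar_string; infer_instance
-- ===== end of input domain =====

-- B replaces A's per-position branch ladder by canonicalize-then-compare (idiomatic decomposition).

-- ===== PORT A =====
-- A's index loop over equal-length strings, transcribed as lockstep recursion on the two char lists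
-- (a = s[i], b = t[i] become the two heads); branches in A's order.
def pvLoopA : List Char → List Char → Bool
  | [], _ => true
  | _ :: _, [] => true
  | a :: as, b :: bs =>
      if a = b then pvLoopA as bs
      else if (a = '1' ∧ b = 'l') ∨ (a = 'l' ∧ b = '1') then pvLoopA as bs
      else if (a = '0' ∧ b = 'o') ∨ (a = 'o' ∧ b = '0') then pvLoopA as bs
      else false

def is_similar_string (n : Int) (s : String) (t : String) : Bool :=
  if s.toList.length ≠ t.toList.length then false
  else pvLoopA s.toList t.toList

-- ===== PORT B =====
def pvCanon (c : Char) : Char :=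
  if c = 'l' then '1' else if c = 'o' then '0' else c

def is_similar_string_alt (n : Int) (s : String) (t : String) : Bool :=
  s.toList.map pvCanon = t.toList.map pvCanon

-- ===== PRECONDITION & SPEC =====
def Spec_is_similar_string (n : Int) (s : String) (t : String) (out : Bool) : Prop := out = is_similar_string_alt n s t
instance (n : Int) (s : String) (t : String) (out : Bool) : Decidable (Spec_is_similar_string n s t out) := by unfold Spec_is_similar_string; infer_instance

-- ===== CLAIM (what is proved, stated in full; the proofs are below) =====
def Claim_equal_is_similar_string : Prop := ∀ (n : Int) (s : String) (t : String), Dom_is_similar_string n s t → Spec_is_similar_string n s t (is_similar_string n s t)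

-- ===== LEMMAS AND PROOFS =====

theorem pvCanon_eq_iff (a b : Char) :
    pvCanon a = pvCanon b ↔
      a = b ∨ ((a = '1' ∧ b = 'l') ∨ (a = 'l' ∧ b = '1')) ∨
        ((a = '0' ∧ b = 'o') ∨ (a = 'o' ∧ b = '0')) := by
  unfold pvCanon
  split_ifs <;> simp_all <;> aesop

theorem pvLoopA_eq (as bs : List Char) (h : as.length = bs.length) :
    pvLoopA as bs = decide (as.map pvCanon = bs.map pvCanon) := by
  induction as generalizing bs with
  | nil => cases bs with
    | nil => simp [pvLoopA]
    | cons b bs => simp at h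
  | cons a as ih =>
    cases bs with
    | nil => simp at h
    | cons b bs =>
      simp at h
      have := ih bs h
      simp only [pvLoopA, List.map]
      by_cases hc : pvCanon a = pvCanon b
      · rcases (pvCanon_eq_iff a b).mp hc with h1 | h1 | h1 <;>
          simp_all
      · have e0 : ¬ a = b := fun x => hc ((pvCanon_eq_iff a b).mpr (Or.inl x))
        have e1 : ¬ ((a = '1' ∧ b = 'l') ∨ (a = 'l' ∧ b = '1')) :=
          fun x => hc ((pvCanon_eq_iff a b).mpr (Or.inr (Or.inl x)))
        have e2 : ¬ ((a = '0' ∧ b = 'o') ∨ (a = 'o' ∧ b = '0')) :=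
          fun x => hc ((pvCanon_eq_iff a b).mpr (Or.inr (Or.inr x)))
        simp [e0, e1, e2, hc]

-- ===== VERDICT (by name: the statement is the Claim_ definition above) =====
theorem is_similar_string_spec : Claim_equal_is_similar_string := by
  intro n s t _
  unfold Spec_is_similar_string
  by_cases h : s.toList.length = t.toList.length
  · simp [is_similar_string, is_similar_string_alt, h, pvLoopA_eq _ _ h]
  · have : s.toList.map pvCanon ≠ t.toList.map pvCanon := by
      intro he
      exact h (by simpa using congrArg List.length he)
    rw [is_similar_string, if_pos h]
    simp [is_similar_string_alt, this]
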